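-- pv_equiv track=rewrite | github.com/miriamveloso/ATP2022 | TPC5.py | colesterol
-- ===== SOURCE A (Python) =====
-- def colesterol(list):
--     distrib=[]
--     e=0
--     while e<540:
--         escalão=[e,e+10]
--         n=0
--         for p in list:
--             if p[-1]=="1" and escalão[0]<=int(p[3])<escalão[1]:
--                     n+=1
--         distrib.append((escalão,n))
--         e+=10
--     return distrib
-- ===== SOURCE B (Python) =====
-- def colesterol(list):
--     cnt = {}
--     for p in list:
--         if p[-1] == "1":
--             b = int(p[3]) // 10
--             cnt[b] = cnt.get(b, 0) + 1
--     return [([e, e + 10], cnt.get(e // 10, 0)) for e in range(0, 540, 10)]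
-- ===== Notes on version B (the rewrite author's own statement) =====
-- stated objective: alternative
-- what changed: A rescans the whole list once per bucket (54 passes with a per-bucket range test); B makes a single pass building a dict counter keyed by int(p[3])//10 and then shapes the 54 output pairs with dict lookups.
import Mathlib
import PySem

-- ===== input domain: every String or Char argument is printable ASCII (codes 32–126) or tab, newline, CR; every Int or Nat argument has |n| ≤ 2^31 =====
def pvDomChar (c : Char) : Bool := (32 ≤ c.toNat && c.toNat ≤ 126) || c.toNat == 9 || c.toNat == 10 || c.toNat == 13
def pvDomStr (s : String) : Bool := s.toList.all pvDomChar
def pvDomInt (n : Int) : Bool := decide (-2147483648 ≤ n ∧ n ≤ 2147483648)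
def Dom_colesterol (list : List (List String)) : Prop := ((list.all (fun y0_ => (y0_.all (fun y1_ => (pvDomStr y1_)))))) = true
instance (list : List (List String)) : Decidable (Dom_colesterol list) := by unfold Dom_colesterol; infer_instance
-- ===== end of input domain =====

-- B replaces A's 54 full scans of the list (one per bucket) by one counting pass into a
-- dict keyed by int(p[3])//10, then shapes the 54 output pairs by dict lookup (objective: alternative algorithm).

-- ===== PORT A =====
-- inner 'for p in list' body of A, for the bucket [e, e+10)
def colA_inner (e : Int) (n : Int) (p : List String) : Int :=
  match PySem.List.pyGet? p (-1) with
  | some s =>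
      if s = "1" then
        match PySem.List.pyGet? p 3 with
        | some t =>
            match PySem.Int.ofStr? t with
            | some v => if e ≤ v ∧ v < e + 10 then n + 1 else n
            | none => n
        | none => n
      else n
  | none => n

-- A's 'while e < 540: … e += 10' appends one pair per e = 0,10,…,530
def colesterol (list : List (List String)) : List (List Int × Int) :=
  (PySem.List.pyRange 0 540 10).foldl
    (fun distrib e => distrib ++ [([e, e + 10], list.foldl (colA_inner e) 0)]) []

-- ===== PORT B =====
-- B's per-row key computation 'int(p[3]) // 10 when p[-1] == "1"' as an Option pipeline
def colB_key (p : List String) : Option Int :=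
  (PySem.List.pyGet? p (-1)).bind fun s =>
    if s = "1" then
      (PySem.List.pyGet? p 3).bind fun t =>
        (PySem.Int.ofStr? t).map fun v => PySem.Int.floordiv v 10
    else none

-- B's 'cnt[b] = cnt.get(b, 0) + 1'
def colB_step (cnt : PySem.Dict Int Int) (p : List String) : PySem.Dict Int Int :=
  match colB_key p with
  | some b => cnt.insert b (cnt.getD b 0 + 1)
  | none => cnt

def colesterol_alt (list : List (List String)) : List (List Int × Int) :=
  let cnt := list.foldl colB_step PySem.Dict.empty
  (PySem.List.pyRange 0 540 10).map
    (fun e => ([e, e + 10], cnt.getD (PySem.Int.floordiv e 10) 0))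

-- ===== PRECONDITION & SPEC =====
-- Pre_ excludes exactly the inputs where Python A raises: a row that is empty (p[-1] IndexError)
-- or whose last entry is "1" but lacks a 4th field (IndexError) or whose 4th field is not a
-- Python int literal (ValueError on int(p[3])).
def pvRowOK (p : List String) : Bool :=
  match PySem.List.pyGet? p (-1) with
  | some s =>
      if s = "1" then
        match PySem.List.pyGet? p 3 with
        | some t => (PySem.Int.ofStr? t).isSome
        | none => false
      else true
  | none => false

def Pre_colesterol (list : List (List String)) : Prop := list.all pvRowOK = true
instance (list : List (List String)) : Decidable (Pre_colesterol list) := by unfold Pre_colesterol; infer_instance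

def pvWitness_colesterol : List (List String) := [["a", "b", "c", "25", "1"], ["x", "0"]]

def Spec_colesterol (list : List (List String)) (out : List (List Int × Int)) : Prop := out = colesterol_alt list
instance (list : List (List String)) (out : List (List Int × Int)) : Decidable (Spec_colesterol list out) := by unfold Spec_colesterol; infer_instance

-- ===== CLAIM (what is proved, stated in full; the proofs are below) =====
def Claim_equal_colesterol : Prop := ∀ (list : List (List String)), Dom_colesterol list → Pre_colesterol list → Spec_colesterol list (colesterol list)

-- ===== LEMMAS AND PROOFS =====

-- A's loop body, read through B's key function: A adds 1 at bucket e = 10*k iff the row's key is k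
lemma colA_inner_eq (k n : Int) (p : List String) :
    colA_inner (10 * k) n p = n + (if colB_key p = some k then 1 else 0) := by
  unfold colA_inner colB_key
  rcases PySem.List.pyGet? p (-1) with _ | s
  · simp
  · by_cases hs : s = "1"
    · simp only [hs, if_true, Option.bind_some]
      rcases PySem.List.pyGet? p 3 with _ | t
      · simp
      · rcases h : PySem.Int.ofStr? t with _ | v
        · simp [h]
        · simp only [h, Option.bind_some, Option.map_some, Option.some.injEq]
          rw [PySem.Int.floordiv_eq_ediv_of_pos (by norm_num : (0:Int) < 10)]
          split_ifs with h1 h2 <;> omega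
    · simp [hs]

lemma foldA_shift (k : Int) (l : List (List String)) (n : Int) :
    l.foldl (colA_inner (10 * k)) n = n + l.foldl (colA_inner (10 * k)) 0 := by
  induction l generalizing n with
  | nil => simp
  | cons p rest ih =>
      simp only [List.foldl]
      rw [ih (colA_inner (10 * k) n p), ih (colA_inner (10 * k) 0 p),
          colA_inner_eq k n p, colA_inner_eq k 0 p]
      ring

-- main invariant of B's counting pass: the dict entry at any key k exceeds its initial value
-- by exactly the number A would count at bucket [10*k, 10*k+10)
lemma counts_get (l : List (List String)) (d : PySem.Dict Int Int) (k : Int) :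
    (l.foldl colB_step d).getD k 0 = d.getD k 0 + l.foldl (colA_inner (10 * k)) 0 := by
  induction l generalizing d with
  | nil => simp
  | cons p rest ih =>
      simp only [List.foldl]
      rw [ih (colB_step d p)]
      have hstep : (colB_step d p).getD k 0 = d.getD k 0 + colA_inner (10 * k) 0 p := by
        rw [colA_inner_eq k 0 p]
        unfold colB_step
        rcases hb : colB_key p with _ | b
        · simp
        · simp only [Option.some.injEq]
          rw [PySem.Dict.getD_insert]
          by_cases hkb : k = b
          · subst hkb; simp
          · rw [if_neg hkb, if_neg (by simpa using fun h => hkb h.symm)]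
            omega
      rw [hstep, foldA_shift k rest (colA_inner (10 * k) 0 p)]
      ring

lemma foldl_append_map {α β : Type} (g : α → β) (l : List α) (init : List β) :
    l.foldl (fun acc e => acc ++ [g e]) init = init ++ l.map g := by
  induction l generalizing init with
  | nil => simp
  | cons a l ih => simp [ih]

lemma pyRange_540 :
    PySem.List.pyRange 0 540 10 = (List.range 54).map (fun k => (10 * (k : Int))) := by
  decide

-- ===== VERDICT (by name: the statement is the Claim_ definition above) =====
theorem colesterol_spec : Claim_equal_colesterol := by
  intro list _ _
  show colesterol list = colesterol_alt list
  unfold colesterol colesterol_alt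
  rw [foldl_append_map, pyRange_540, List.nil_append, List.map_map, List.map_map]
  apply List.map_congr_left
  intro k _
  simp only [Function.comp]
  have hk : PySem.Int.floordiv (10 * (k : Int)) 10 = (k : Int) := by
    rw [PySem.Int.floordiv_eq_ediv_of_pos (by norm_num : (0:Int) < 10)]
    omega
  rw [hk, counts_get list PySem.Dict.empty (k : Int), PySem.Dict.getD_empty, zero_add]
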